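-- pv_equiv track=rewrite | github.com/razorkam/HH-school-challenge-2017 | sequences.py | is_wonderful
-- ===== SOURCE A (Python) =====
-- def is_wonderful(num):
--     lst = [int(i) for i in str(num) if i != '0']
--     flags = [False] * len(lst)
--     for i, digit in enumerate(lst):
--         wnd_sum = digit
--         j = i + 1
--         while j < len(lst):
--             wnd_sum += lst[j]
--             if wnd_sum == 10:
--                 flags[i:j+1] = [True] * (j-i+1)
--                 break
--             elif wnd_sum > 10:
--                 break
--
--             j += 1
--
--     return all(flag is True for flag in flags)
-- ===== SOURCE B (Python) =====
-- def is_wonderful(num):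
--     lst = [int(i) for i in str(num) if i != '0']
--     n = len(lst)
--     windows = [(l, r) for l in range(n) for r in range(l, n)
--                if sum(lst[l:r + 1]) == 10]
--     return all(any(l <= p <= r for (l, r) in windows) for p in range(n))
-- ===== Notes on version B (the rewrite author's own statement) =====
-- stated objective: alternative
-- what changed: Replaces A's per-start greedy scan with early break and in-place flag slice-assignment by a declarative enumeration of all contiguous windows summing to 10 followed by a coverage check of every position.
import Mathlib
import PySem

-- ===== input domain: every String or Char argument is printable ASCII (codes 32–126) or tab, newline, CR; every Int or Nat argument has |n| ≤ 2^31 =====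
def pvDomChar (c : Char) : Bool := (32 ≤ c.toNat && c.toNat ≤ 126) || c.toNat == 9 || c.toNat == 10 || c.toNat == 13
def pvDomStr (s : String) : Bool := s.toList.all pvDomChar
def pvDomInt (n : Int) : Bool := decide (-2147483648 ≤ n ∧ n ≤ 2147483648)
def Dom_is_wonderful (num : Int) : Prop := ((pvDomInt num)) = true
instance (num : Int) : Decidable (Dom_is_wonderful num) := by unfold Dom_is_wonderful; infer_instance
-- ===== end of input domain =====

-- B replaces A's greedy per-start scan (with early break and in-place flag slice-assignment)
-- by a declarative enumeration of all windows summing to 10 plus a coverage check (objective: alternative).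

-- ===== PORT A =====
-- lst = [int(i) for i in str(num) if i != '0'] (this line is shared verbatim by both Pythons).
-- `.getD 0` is never reached under Pre_ (0 ≤ num ⇒ every char is a digit, so ofChars? = some);
-- for num < 0 Python raises ValueError on int('-'), excluded by Pre_.
def pvParseDigits (num : Int) : List Int :=
  ((PySem.Int.toChars num).filter (fun c => c ≠ '0')).map
    (fun c => (PySem.Int.ofChars? [c]).getD 0)

-- A's inner `while j < len(lst)` loop: returns the j at which wnd_sum hits 10, none on break/fall-through.
def pvInnerA (lst : List Int) (wnd : Int) (j : Nat) : Option Nat :=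
  if h : j < lst.length then
    let w := wnd + lst[j]
    if w = 10 then some j
    else if 10 < w then none
    else pvInnerA lst w (j + 1)
  else none
termination_by lst.length - j

-- flags[i:j+1] = [True] * (j-i+1)
def pvSetTrue (flags : List Bool) (i j : Nat) : List Bool :=
  flags.take i ++ List.replicate (j - i + 1) true ++ flags.drop (j + 1)

def is_wonderful (num : Int) : Bool :=
  let lst := pvParseDigits num
  let flags0 := List.replicate lst.length false
  let flags := (List.range lst.length).foldl (fun flags i =>
      match pvInnerA lst (lst.getD i 0) (i + 1) with
      | some j => pvSetTrue flags i j
      | none => flags) flags0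
  flags.all (fun f => f == true)

-- ===== PORT B =====
def is_wonderful_alt (num : Int) : Bool :=
  let lst := pvParseDigits num
  let n := lst.length
  let windows : List (Nat × Nat) := (List.range n).flatMap (fun l =>
    ((List.range' l (n - l)).filter
        (fun (r : Nat) => (PySem.List.slice lst (some (l : Int)) (some ((r : Int) + 1))).sum == 10)).map
      (fun r => (l, r)))
  (List.range n).all (fun p => windows.any (fun w => w.1 ≤ p && p ≤ w.2))

-- ===== PRECONDITION & SPEC =====
-- Pre_ excludes exactly num < 0, where Python's int('-') raises ValueError (in A and in B alike).
def Pre_is_wonderful (num : Int) : Prop := 0 ≤ num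
instance (num : Int) : Decidable (Pre_is_wonderful num) := by unfold Pre_is_wonderful; infer_instance
def pvWitness_is_wonderful : Int := (28 : Int)

def Spec_is_wonderful (num : Int) (out : Bool) : Prop := out = is_wonderful_alt num
instance (num : Int) (out : Bool) : Decidable (Spec_is_wonderful num out) := by unfold Spec_is_wonderful; infer_instance

-- ===== CLAIM (what is proved, stated in full; the proofs are below) =====
def Claim_equal_is_wonderful : Prop := ∀ (num : Int), Dom_is_wonderful num → Pre_is_wonderful num → Spec_is_wonderful num (is_wonderful num)

-- ===== LEMMAS AND PROOFS =====

-- sum of the window lst[l..r] (inclusive)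
def pvWinSum (L : List Int) (l r : Nat) : Int := ((L.drop l).take (r + 1 - l)).sum

-- positions already covered after A has processed window starts 0..k-1
def pvCovA (L : List Int) (k p : Nat) : Prop :=
  ∃ i, i < k ∧ ∃ r, pvInnerA L (L.getD i 0) (i + 1) = some r ∧ i ≤ p ∧ p ≤ r

-- the body of A's outer loop
def pvStepA (L : List Int) (flags : List Bool) (i : Nat) : List Bool :=
  match pvInnerA L (L.getD i 0) (i + 1) with
  | some j => pvSetTrue flags i j
  | none => flags

-- every char produced by Nat.toDigitsCore with base 10 satisfies any P true of all digitChars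
theorem pvToDigitsCore_prop (P : Char → Prop) (hd : ∀ m : Nat, m < 10 → P (Nat.digitChar m)) :
    ∀ (fuel n : Nat) (ds : List Char), (∀ x ∈ ds, P x) →
      ∀ c ∈ Nat.toDigitsCore 10 fuel n ds, P c := by
  intro fuel
  induction fuel with
  | zero => intro n ds hds c hc; simp [Nat.toDigitsCore] at hc; exact hds c hc
  | succ f ih =>
    intro n ds hds c hc
    rw [Nat.toDigitsCore] at hc
    have hP : P ((n % 10).digitChar) := hd _ (Nat.mod_lt _ (by norm_num))
    by_cases h0 : n / 10 = 0
    · simp only [h0] at hc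
      rcases List.mem_cons.mp hc with h | h
      · exact h ▸ hP
      · exact hds c h
    · simp only [if_neg h0] at hc
      exact ih (n / 10) _ (by intro x hx; rcases List.mem_cons.mp hx with h | h; exacts [h ▸ hP, hds x h]) c hc

theorem pvParse_bounds (num : Int) (h : 0 ≤ num) :
    ∀ x ∈ pvParseDigits num, 1 ≤ x ∧ x ≤ 9 := by
  intro x hx
  unfold pvParseDigits at hx
  rcases List.mem_map.mp hx with ⟨c, hc, rfl⟩
  rcases List.mem_filter.mp hc with ⟨hmem, hne⟩
  have hne' : c ≠ '0' := by simpa using hne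
  have hdig : c = '0' ∨ (1 ≤ (PySem.Int.ofChars? [c]).getD 0 ∧ (PySem.Int.ofChars? [c]).getD 0 ≤ 9) := by
    have hmem' : c ∈ Nat.toDigits 10 num.toNat := by
      unfold PySem.Int.toChars at hmem
      rw [if_neg (by omega)] at hmem
      exact hmem
    refine pvToDigitsCore_prop
      (fun c => c = '0' ∨ (1 ≤ (PySem.Int.ofChars? [c]).getD 0 ∧ (PySem.Int.ofChars? [c]).getD 0 ≤ 9))
      (by decide) _ _ [] (by simp) c hmem'
  rcases hdig with h0 | hb
  · exact absurd h0 hne'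
  · exact hb

theorem pvSum_ge_length (M : List Int) (h : ∀ x ∈ M, 1 ≤ x) : (M.length : Int) ≤ M.sum := by
  induction M with
  | nil => simp
  | cons a t ih =>
    have := h a (List.mem_cons_self)
    have := ih (fun x hx => h x (List.mem_cons_of_mem _ hx))
    simp only [List.length_cons, List.sum_cons]
    push_cast
    omega

-- with all-positive entries, A's inner loop finds r exactly when the window [j..r] completes wnd to 10
theorem pvInnerA_some_iff (L : List Int) (hpos : ∀ x ∈ L, 1 ≤ x) :
    ∀ (j : Nat) (wnd : Int) (r : Nat),
      pvInnerA L wnd j = some r ↔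
        (j ≤ r ∧ r < L.length ∧ wnd + ((L.drop j).take (r + 1 - j)).sum = 10) := by
  have hsubpos : ∀ a b : Nat, ∀ x ∈ (L.drop a).take b, 1 ≤ x := by
    intro a b x hx
    exact hpos x (List.mem_of_mem_drop (List.mem_of_mem_take hx))
  have hsublen : ∀ a b : Nat, a + b ≤ L.length → ((L.drop a).take b).length = b := by
    intro a b hab; simp; omega
  have hdecomp : ∀ (j r : Nat) (hj : j < L.length), j ≤ r →
      (L.drop j).take (r + 1 - j) = L[j]'hj :: (L.drop (j + 1)).take (r - j) := by
    intro j r hj hjr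
    rw [List.drop_eq_getElem_cons hj]
    have : r + 1 - j = (r - j) + 1 := by omega
    rw [this, List.take_succ_cons]
  have key : ∀ (f j : Nat) (wnd : Int) (r : Nat), L.length - j ≤ f →
      (pvInnerA L wnd j = some r ↔
        (j ≤ r ∧ r < L.length ∧ wnd + ((L.drop j).take (r + 1 - j)).sum = 10)) := by
    intro f
    induction f with
    | zero =>
      intro j wnd r hf
      rw [pvInnerA, dif_neg (by omega)]
      constructor
      · intro h; exact absurd h (by simp)
      · intro ⟨h1, h2, _⟩; omega
    | succ f ih =>
      intro j wnd r hf
      rw [pvInnerA]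
      by_cases hj : j < L.length
      · rw [dif_pos hj]
        simp only []
        by_cases h10 : wnd + L[j] = 10
        · rw [if_pos h10]
          constructor
          · intro h
            have hr : r = j := (Option.some.inj h).symm
            subst hr
            refine ⟨le_refl _, hj, ?_⟩
            rw [hdecomp r r hj (le_refl _)]
            simp [h10]
          · intro ⟨h1, h2, h3⟩
            rcases eq_or_lt_of_le h1 with rfl | hlt
            · rfl
            · exfalso
              rw [hdecomp j r hj h1, List.sum_cons] at h3
              have hlen : ((L.drop (j + 1)).take (r - j)).length = r - j :=
                hsublen (j + 1) (r - j) (by omega)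
              have := pvSum_ge_length _ (hsubpos (j + 1) (r - j))
              rw [hlen] at this
              have : (1 : Int) ≤ ((L.drop (j + 1)).take (r - j)).sum := by
                have hq : (1 : Int) ≤ ((r - j : Nat) : Int) := by exact_mod_cast by omega
                omega
              omega
        · rw [if_neg h10]
          by_cases hgt : 10 < wnd + L[j]
          · rw [if_pos hgt]
            constructor
            · intro h; exact absurd h (by simp)
            · intro ⟨h1, h2, h3⟩
              exfalso
              rw [hdecomp j r hj h1, List.sum_cons] at h3
              have := pvSum_ge_length _ (hsubpos (j + 1) (r - j))
              have hq : (0 : Int) ≤ ((r - j : Nat) : Int) := by positivity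
              omega
          · rw [if_neg hgt]
            rw [ih (j + 1) (wnd + L[j]) r (by omega)]
            have hnorm : r + 1 - (j + 1) = r - j := by omega
            rw [hnorm]
            constructor
            · intro ⟨h1, h2, h3⟩
              refine ⟨by omega, h2, ?_⟩
              rw [hdecomp j r hj (by omega), List.sum_cons]
              omega
            · intro ⟨h1, h2, h3⟩
              rcases eq_or_lt_of_le h1 with rfl | hlt
              · exfalso
                rw [hdecomp j j hj (le_refl _)] at h3
                simp at h3
                omega
              · rw [hdecomp j r hj h1, List.sum_cons] at h3
                exact ⟨by omega, h2, by omega⟩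
      · rw [dif_neg hj]
        constructor
        · intro h; exact absurd h (by simp)
        · intro ⟨h1, h2, _⟩; omega
  intro j wnd r
  exact key (L.length - j) j wnd r (le_refl _)

theorem pvSetTrue_length (flags : List Bool) (i j : Nat) (hij : i ≤ j) (hj : j < flags.length) :
    (pvSetTrue flags i j).length = flags.length := by
  unfold pvSetTrue
  simp only [List.length_append, List.length_take, List.length_replicate, List.length_drop]
  omega

theorem pvSetTrue_getD (flags : List Bool) (i j p : Nat) (hij : i ≤ j) (hj : j < flags.length) :
    (pvSetTrue flags i j).getD p false =
      if i ≤ p ∧ p ≤ j then true else flags.getD p false := by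
  unfold pvSetTrue
  have hi : i < flags.length := by omega
  have hA : (flags.take i).length = i := by simp; omega
  have hAB : (flags.take i ++ List.replicate (j - i + 1) true).length = j + 1 := by
    simp only [List.length_append, List.length_replicate]; omega
  rcases lt_or_ge p flags.length with hp | hp
  · rw [List.getD_eq_getElem _ _ (by simp only [List.length_append, List.length_take,
        List.length_replicate, List.length_drop]; omega),
      List.getD_eq_getElem _ _ hp]
    rcases lt_or_ge p i with h1 | h1
    · rw [List.getElem_append_left (by omega), List.getElem_append_left (by omega),
        if_neg (by omega), List.getElem_take]
    · rcases le_or_gt p j with h2 | h2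
      · rw [List.getElem_append_left (by omega), List.getElem_append_right (by omega),
          if_pos ⟨h1, h2⟩, List.getElem_replicate]
      · rw [List.getElem_append_right (by omega), if_neg (by omega)]
        rw [List.getElem_drop]
        congr 1
        omega
  · rw [List.getD_eq_default _ _ (by simp only [List.length_append, List.length_take,
        List.length_replicate, List.length_drop]; omega),
      List.getD_eq_default _ _ hp, if_neg (by omega)]

theorem pvFoldA_inv (L : List Int) (hpos : ∀ x ∈ L, 1 ≤ x) (k : Nat) :
    ((List.range k).foldl (pvStepA L) (List.replicate L.length false)).length = L.length ∧
    ∀ p, (((List.range k).foldl (pvStepA L) (List.replicate L.length false)).getD p false = true ↔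
      pvCovA L k p) := by
  induction k with
  | zero =>
    refine ⟨by simp, ?_⟩
    intro p
    constructor
    · intro h
      exfalso
      rcases lt_or_ge p L.length with hp | hp
      · rw [List.getD_eq_getElem _ _ (by simpa using hp)] at h
        simp at h
      · rw [List.getD_eq_default _ _ (by simpa using hp)] at h
        exact Bool.false_ne_true h
    · intro ⟨i, hi, _⟩; omega
  | succ k ih =>
    rw [List.range_succ, List.foldl_append, List.foldl_cons, List.foldl_nil]
    obtain ⟨ihlen, ihptw⟩ := ih
    set flags := (List.range k).foldl (pvStepA L) (List.replicate L.length false) with hflags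
    have hcov : ∀ p, pvCovA L (k + 1) p ↔ pvCovA L k p ∨
        (∃ r, pvInnerA L (L.getD k 0) (k + 1) = some r ∧ k ≤ p ∧ p ≤ r) := by
      intro p
      constructor
      · intro ⟨i, hi, hr⟩
        rcases Nat.lt_succ_iff_lt_or_eq.mp hi with h | rfl
        · exact Or.inl ⟨i, h, hr⟩
        · exact Or.inr hr
      · intro h
        rcases h with ⟨i, hi, hr⟩ | hr
        · exact ⟨i, by omega, hr⟩
        · exact ⟨k, by omega, hr⟩
    unfold pvStepA
    cases hres : pvInnerA L (L.getD k 0) (k + 1) with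
    | none =>
      refine ⟨ihlen, fun p => ?_⟩
      rw [ihptw p, hcov p]
      constructor
      · exact Or.inl
      · intro h
        rcases h with h | ⟨r, hr, _⟩
        · exact h
        · rw [hres] at hr; exact absurd hr (by simp)
    | some j =>
      have hj := (pvInnerA_some_iff L hpos (k + 1) (L.getD k 0) j).mp hres
      have hkj : k ≤ j := by omega
      have hjlen : j < flags.length := by omega
      refine ⟨by rw [pvSetTrue_length flags k j hkj hjlen]; exact ihlen, fun p => ?_⟩
      rw [pvSetTrue_getD flags k j p hkj hjlen, hcov p]
      split_ifs with hcase
      · simp only [true_iff]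
        exact Or.inr ⟨j, hres, hcase.1, hcase.2⟩
      · rw [ihptw p]
        constructor
        · exact Or.inl
        · intro h
          rcases h with h | ⟨r, hr, hp1, hp2⟩
          · exact h
          · have : r = j := Option.some.inj (hr.symm.trans hres)
            exact absurd ⟨hp1, this ▸ hp2⟩ hcase

theorem pvA_iff (num : Int) (hpos : ∀ x ∈ pvParseDigits num, 1 ≤ x) :
    is_wonderful num = true ↔
      ∀ p < (pvParseDigits num).length, pvCovA (pvParseDigits num) (pvParseDigits num).length p := by
  unfold is_wonderful
  set L := pvParseDigits num with hL
  show ((List.range L.length).foldl (pvStepA L) (List.replicate L.length false)).all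
      (fun f => f == true) = true ↔ _
  obtain ⟨hlen, hptw⟩ := pvFoldA_inv L hpos L.length
  set flags := (List.range L.length).foldl (pvStepA L) (List.replicate L.length false) with hflags
  rw [List.all_eq_true]
  constructor
  · intro h p hp
    have hp' : p < flags.length := by omega
    have := h flags[p] (List.getElem_mem hp')
    rw [← hptw p, List.getD_eq_getElem _ _ hp']
    simpa using this
  · intro h f hf
    rcases List.mem_iff_getElem.mp hf with ⟨p, hp, rfl⟩
    have := (hptw p).mpr (h p (by omega))
    rw [List.getD_eq_getElem _ _ hp] at this
    simpa using this

theorem pvB_iff (num : Int) :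
    is_wonderful_alt num = true ↔
      ∀ p < (pvParseDigits num).length, ∃ l r, l ≤ p ∧ p ≤ r ∧ r < (pvParseDigits num).length ∧
        pvWinSum (pvParseDigits num) l r = 10 := by
  unfold is_wonderful_alt
  set L := pvParseDigits num with hL
  simp only [List.all_eq_true, List.mem_range, List.any_eq_true, List.mem_flatMap,
    List.mem_map, List.mem_filter, Bool.and_eq_true, decide_eq_true_eq, beq_iff_eq]
  constructor
  · intro h p hp
    obtain ⟨w, ⟨l, hl, r, ⟨hr1, hr2⟩, rfl⟩, hw1, hw2⟩ := h p hp
    refine ⟨l, r, hw1, hw2, ?_, ?_⟩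
    · have := List.mem_range'_1.mp hr1
      omega
    · have hcast : ((r : Int) + 1) = ((r + 1 : Nat) : Int) := by push_cast; ring
      rw [hcast, PySem.List.slice_natCast] at hr2
      exact hr2
  · intro h p hp
    obtain ⟨l, r, h1, h2, h3, h4⟩ := h p hp
    refine ⟨(l, r), ⟨l, by omega, r, ⟨?_, ?_⟩, rfl⟩, h1, h2⟩
    · rw [List.mem_range'_1]
      omega
    · have hcast : ((r : Int) + 1) = ((r + 1 : Nat) : Int) := by push_cast; ring
      rw [hcast, PySem.List.slice_natCast]
      exact h4

-- A covers p (all starts processed) iff some window summing to 10 contains p; digits in 1..9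
theorem pvCov_bridge (L : List Int) (hb : ∀ x ∈ L, 1 ≤ x ∧ x ≤ 9) (p : Nat) :
    pvCovA L L.length p ↔ ∃ l r, l ≤ p ∧ p ≤ r ∧ r < L.length ∧ pvWinSum L l r = 10 := by
  have hpos : ∀ x ∈ L, 1 ≤ x := fun x hx => (hb x hx).1
  have hdecomp : ∀ (l r : Nat) (hl : l < L.length), l ≤ r →
      pvWinSum L l r = L[l]'hl + ((L.drop (l + 1)).take (r - l)).sum := by
    intro l r hl hlr
    unfold pvWinSum
    rw [List.drop_eq_getElem_cons hl]
    have : r + 1 - l = (r - l) + 1 := by omega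
    rw [this, List.take_succ_cons, List.sum_cons]
  constructor
  · intro ⟨i, hi, r, hres, hp1, hp2⟩
    have h := (pvInnerA_some_iff L hpos (i + 1) (L.getD i 0) r).mp hres
    refine ⟨i, r, hp1, hp2, h.2.1, ?_⟩
    rw [hdecomp i r hi (by omega)]
    rw [List.getD_eq_getElem _ _ hi] at h
    have hnorm : r + 1 - (i + 1) = r - i := by omega
    rw [hnorm] at h
    omega
  · intro ⟨l, r, h1, h2, h3, h4⟩
    have hl : l < L.length := by omega
    have hlr : l < r := by
      rcases Nat.lt_or_ge l r with h | h
      · exact h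
      · exfalso
        have : l = r := by omega
        subst this
        rw [hdecomp l l hl (le_refl _)] at h4
        simp at h4
        have := (hb L[l] (List.getElem_mem hl)).2
        omega
    refine ⟨l, by omega, r, ?_, h1, h2⟩
    rw [pvInnerA_some_iff L hpos (l + 1) (L.getD l 0) r]
    refine ⟨by omega, h3, ?_⟩
    rw [List.getD_eq_getElem _ _ hl]
    have hnorm : r + 1 - (l + 1) = r - l := by omega
    rw [hnorm]
    rw [hdecomp l r hl (by omega)] at h4
    omega

-- ===== VERDICT (by name: the statement is the Claim_ definition above) =====
theorem is_wonderful_spec : Claim_equal_is_wonderful := by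
  intro num _ hpre
  unfold Spec_is_wonderful
  have hb := pvParse_bounds num hpre
  rw [Bool.eq_iff_iff, pvA_iff num (fun x hx => (hb x hx).1), pvB_iff num]
  constructor
  · intro h p hp
    exact (pvCov_bridge _ hb p).mp (h p hp)
  · intro h p hp
    exact (pvCov_bridge _ hb p).mpr (h p hp)
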